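-- pv_equiv track=rewrite | github.com/nottherealtar/TarsOnlineCogs | coffee/coffee.py | title_for_best_streak
-- ===== SOURCE A (Python) =====
-- from typing import List, Optional, Tuple
--
-- TITLE_LADDER: List[Tuple[int, str]] = [
--     (0, "Decaf Outsider"),
--     (1, "Bean Apprentice"),
--     (3, "Pour-Over Pupil"),
--     (7, "Latte Luminary"),
--     (14, "Cortado Cultist"),
--     (30, "Moka Mystic"),
--     (60, "Siphon Sage"),
--     (100, "Espresso Eldritch"),
-- ]
--
-- def title_for_best_streak(best: int) -> Tuple[str, Optional[int]]:
--     """Current title from lifetime best streak, and next threshold (or None if maxed)."""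
--     name = TITLE_LADDER[0][1]
--     next_need: Optional[int] = None
--     for i, (need, tier_name) in enumerate(TITLE_LADDER):
--         if best >= need:
--             name = tier_name
--         else:
--             next_need = need
--             break
--     return name, next_need
-- ===== SOURCE B (Python) =====
-- from typing import List, Optional, Tuple
--
-- TITLE_LADDER: List[Tuple[int, str]] = [
--     (0, "Decaf Outsider"),
--     (1, "Bean Apprentice"),
--     (3, "Pour-Over Pupil"),
--     (7, "Latte Luminary"),
--     (14, "Cortado Cultist"),
--     (30, "Moka Mystic"),
--     (60, "Siphon Sage"),
--     (100, "Espresso Eldritch"),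
-- ]
--
-- def title_for_best_streak(best: int) -> Tuple[str, Optional[int]]:
--     """Current title from lifetime best streak, and next threshold (or None if maxed)."""
--     # Binary search (bisect_right) over the ascending thresholds: lo ends up as
--     # the number of thresholds <= best.
--     lo, hi = 0, len(TITLE_LADDER)
--     while lo < hi:
--         mid = (lo + hi) // 2
--         if TITLE_LADDER[mid][0] <= best:
--             lo = mid + 1
--         else:
--             hi = mid
--     name = TITLE_LADDER[lo - 1][1] if lo > 0 else TITLE_LADDER[0][1]
--     next_need = TITLE_LADDER[lo][0] if lo < len(TITLE_LADDER) else None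
--     return name, next_need
-- ===== Notes on version B (the rewrite author's own statement) =====
-- stated objective: alternative
-- what changed: Replaces A's linear scan with break by a hand-rolled bisect_right binary search over the ascending thresholds; the resulting insertion point directly indexes both the current title and the next threshold.
import Mathlib
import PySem

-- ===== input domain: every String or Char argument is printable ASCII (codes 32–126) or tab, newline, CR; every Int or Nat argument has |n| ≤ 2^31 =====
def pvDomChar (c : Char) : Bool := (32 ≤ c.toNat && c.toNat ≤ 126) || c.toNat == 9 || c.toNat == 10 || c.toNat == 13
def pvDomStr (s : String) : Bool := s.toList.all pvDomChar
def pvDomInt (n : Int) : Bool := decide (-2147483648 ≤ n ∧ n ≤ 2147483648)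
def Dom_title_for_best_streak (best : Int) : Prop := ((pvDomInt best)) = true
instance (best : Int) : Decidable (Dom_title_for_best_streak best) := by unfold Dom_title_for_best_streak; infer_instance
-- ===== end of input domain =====

-- B replaces A's linear scan-with-break by a bisect_right binary search over the sorted thresholds; objective: alternative.

def TITLE_LADDER : List (Int × String) :=
  [(0, "Decaf Outsider"), (1, "Bean Apprentice"), (3, "Pour-Over Pupil"),
   (7, "Latte Luminary"), (14, "Cortado Cultist"), (30, "Moka Mystic"),
   (60, "Siphon Sage"), (100, "Espresso Eldritch")]

-- ===== PORT A =====
-- the for-loop with break: carries (name, next_need); break returns immediately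
def titleLoopA (best : Int) : List (Int × String) → String → Option Int → String × Option Int
  | [], name, next_need => (name, next_need)
  | (need, tier_name) :: rest, name, next_need =>
    if best ≥ need then titleLoopA best rest tier_name next_need
    else (name, some need)

def title_for_best_streak (best : Int) : String × Option Int :=
  titleLoopA best TITLE_LADDER "Decaf Outsider" none

-- ===== PORT B =====
-- the while-loop of Source B; indexing is always in range (lo ≤ mid < hi ≤ length), so getD is exact
def bisectLoop (best : Int) (lo hi : Nat) : Nat :=
  if lo < hi then
    let mid := (lo + hi) / 2
    if (TITLE_LADDER.getD mid (0, "")).1 ≤ best then bisectLoop best (mid + 1) hi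
    else bisectLoop best lo mid
  else lo
termination_by hi - lo
decreasing_by all_goals omega

def title_for_best_streak_alt (best : Int) : String × Option Int :=
  let lo := bisectLoop best 0 TITLE_LADDER.length
  let name := if lo > 0 then (TITLE_LADDER.getD (lo - 1) (0, "")).2 else (TITLE_LADDER.getD 0 (0, "")).2
  let next_need := if lo < TITLE_LADDER.length then some (TITLE_LADDER.getD lo (0, "")).1 else none
  (name, next_need)

-- ===== PRECONDITION & SPEC =====
def Spec_title_for_best_streak (best : Int) (out : String × Option Int) : Prop := out = title_for_best_streak_alt best
instance (best : Int) (out : String × Option Int) : Decidable (Spec_title_for_best_streak best out) := by unfold Spec_title_for_best_streak; infer_instance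

-- ===== CLAIM (what is proved, stated in full; the proofs are below) =====
def Claim_equal_title_for_best_streak : Prop := ∀ (best : Int), Dom_title_for_best_streak best → Spec_title_for_best_streak best (title_for_best_streak best)

-- ===== LEMMAS AND PROOFS =====

-- ===== VERDICT (by name: the statement is the Claim_ definition above) =====
theorem title_for_best_streak_spec : Claim_equal_title_for_best_streak := by
  intro best _
  unfold Spec_title_for_best_streak title_for_best_streak title_for_best_streak_alt TITLE_LADDER
  by_cases h0 : (0:Int) ≤ best <;> by_cases h1 : (1:Int) ≤ best <;>
    by_cases h3 : (3:Int) ≤ best <;> by_cases h7 : (7:Int) ≤ best <;>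
    by_cases h14 : (14:Int) ≤ best <;> by_cases h30 : (30:Int) ≤ best <;>
    by_cases h60 : (60:Int) ≤ best <;> by_cases h100 : (100:Int) ≤ best <;>
    first
      | omega
      | simp [titleLoopA, bisectLoop, TITLE_LADDER, h0, h1, h3, h7, h14, h30, h60, h100]
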